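-- pv_equiv track=rewrite | github.com/russellmiller49/proc_suite_deploy | app/registry/self_correction/apply.py | _normalize_foreign_body_retrieval_tool
-- ===== SOURCE A (Python) =====
-- def _normalize_foreign_body_retrieval_tool(value: object) -> str | None:
--     if value is None:
--         return None
--     text = str(value).strip()
--     if not text:
--         return None
--
--     canonical = {
--         "forceps": "Forceps",
--         "basket": "Basket",
--         "cryoprobe": "Cryoprobe",
--         "snare": "Snare",
--         "other": "Other",
--     }
--     lowered = text.lower()
--     for key, out in canonical.items():
--         if lowered == key:
--             return out
--     if "forceps" in lowered:
--         return "Forceps"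
--     if "basket" in lowered:
--         return "Basket"
--     if "cryo" in lowered:
--         return "Cryoprobe"
--     if "snare" in lowered:
--         return "Snare"
--     if lowered in {"unknown", "n/a", "na"}:
--         return "Other"
--     return "Other"
-- ===== SOURCE B (Python) =====
-- def _normalize_foreign_body_retrieval_tool(value: object) -> str | None:
--     # Single ordered substring scan: the exact-match dict is subsumed by the
--     # substring rules plus the 'Other' default.
--     if value is None:
--         return None
--     lowered = str(value).strip().lower()
--     if not lowered:
--         return None
--     for pattern, out in (("forceps", "Forceps"), ("basket", "Basket"),
--                          ("cryo", "Cryoprobe"), ("snare", "Snare")):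
--         if pattern in lowered:
--             return out
--     return "Other"
-- ===== Notes on version B (the rewrite author's own statement) =====
-- stated objective: simpler
-- what changed: Replaced A's two-phase structure (exact-match loop over a 5-entry dict, then a hardcoded if-chain plus a redundant set-membership check) with one data-driven scan over an ordered 4-entry substring table with a default fallback; the exact-match phase is fully subsumed by the substring rules.
import Mathlib
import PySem

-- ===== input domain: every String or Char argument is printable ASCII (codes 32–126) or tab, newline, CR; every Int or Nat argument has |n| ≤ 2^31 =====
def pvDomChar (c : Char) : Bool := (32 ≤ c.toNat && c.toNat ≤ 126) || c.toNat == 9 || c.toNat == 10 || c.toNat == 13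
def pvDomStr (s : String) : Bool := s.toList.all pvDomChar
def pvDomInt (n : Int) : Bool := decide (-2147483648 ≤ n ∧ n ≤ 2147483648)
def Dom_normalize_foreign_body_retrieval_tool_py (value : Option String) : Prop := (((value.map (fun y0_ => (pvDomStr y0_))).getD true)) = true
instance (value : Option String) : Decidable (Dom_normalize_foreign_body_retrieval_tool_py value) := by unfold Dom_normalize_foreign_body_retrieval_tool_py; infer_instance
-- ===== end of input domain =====

-- B replaces A's two-phase normalization (exact-match dict loop + hardcoded if-chain)
-- with a single ordered substring-table scan; objective: simpler.

-- ===== PORT A =====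
def pvCanonicalA : List (String × String) :=
  [("forceps", "Forceps"), ("basket", "Basket"), ("cryoprobe", "Cryoprobe"),
   ("snare", "Snare"), ("other", "Other")]

-- the 'for key, out in canonical.items(): if lowered == key: return out' loop
def pvExactLoopA : List (String × String) → String → Option String
  | [], _ => none
  | (k, out) :: rest, lowered => if lowered == k then some out else pvExactLoopA rest lowered

def normalize_foreign_body_retrieval_tool_py (value : Option String) : Option String :=
  match value with
  | none => none
  | some v =>
    let text := PySem.Str.strip v
    if text == "" then none
    else
      let lowered := PySem.Str.lower text
      match pvExactLoopA pvCanonicalA lowered with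
      | some out => some out
      | none =>
        if PySem.Str.isIn "forceps" lowered then some "Forceps"
        else if PySem.Str.isIn "basket" lowered then some "Basket"
        else if PySem.Str.isIn "cryo" lowered then some "Cryoprobe"
        else if PySem.Str.isIn "snare" lowered then some "Snare"
        else if PySem.Set.contains (PySem.Set.ofList ["unknown", "n/a", "na"]) lowered
          then some "Other"
        else some "Other"

-- ===== PORT B =====
def pvTableB : List (String × String) :=
  [("forceps", "Forceps"), ("basket", "Basket"), ("cryo", "Cryoprobe"), ("snare", "Snare")]

def pvScanB : List (String × String) → String → String
  | [], _ => "Other"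
  | (pat, out) :: rest, lowered =>
    if PySem.Str.isIn pat lowered then out else pvScanB rest lowered

def normalize_foreign_body_retrieval_tool_py_alt (value : Option String) : Option String :=
  match value with
  | none => none
  | some v =>
    let lowered := PySem.Str.lower (PySem.Str.strip v)
    if lowered == "" then none
    else some (pvScanB pvTableB lowered)

-- ===== PRECONDITION & SPEC =====
def Spec_normalize_foreign_body_retrieval_tool_py (value : Option String) (out : Option String) : Prop := out = normalize_foreign_body_retrieval_tool_py_alt value
instance (value : Option String) (out : Option String) : Decidable (Spec_normalize_foreign_body_retrieval_tool_py value out) := by unfold Spec_normalize_foreign_body_retrieval_tool_py; infer_instance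

-- ===== CLAIM (what is proved, stated in full; the proofs are below) =====
def Claim_equal_normalize_foreign_body_retrieval_tool_py : Prop := ∀ (value : Option String), Dom_normalize_foreign_body_retrieval_tool_py value → Spec_normalize_foreign_body_retrieval_tool_py value (normalize_foreign_body_retrieval_tool_py value)

-- ===== LEMMAS AND PROOFS =====

-- strip then lower is empty iff strip is empty (lower maps chars 1-1)
theorem pv_lower_empty_iff (s : String) :
    (PySem.Str.lower s == "") = (s == "") := by
  have h1 : (PySem.Str.lower s = "") ↔ (s = "") := by
    rw [← String.toList_inj, ← String.toList_inj]
    simp [PySem.Chars.lower]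
  cases hs : s == "" <;> simp_all

-- the per-string core equality, for any lowered string
theorem pv_core_eq (lowered : String) :
    (match pvExactLoopA pvCanonicalA lowered with
      | some out => some out
      | none =>
        if PySem.Str.isIn "forceps" lowered then some "Forceps"
        else if PySem.Str.isIn "basket" lowered then some "Basket"
        else if PySem.Str.isIn "cryo" lowered then some "Cryoprobe"
        else if PySem.Str.isIn "snare" lowered then some "Snare"
        else if PySem.Set.contains (PySem.Set.ofList ["unknown", "n/a", "na"]) lowered
          then some "Other"
        else some "Other")
    = some (pvScanB pvTableB lowered) := by
  by_cases h1 : lowered = "forceps"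
  · subst h1; decide
  by_cases h2 : lowered = "basket"
  · subst h2; decide
  by_cases h3 : lowered = "cryoprobe"
  · subst h3; decide
  by_cases h4 : lowered = "snare"
  · subst h4; decide
  by_cases h5 : lowered = "other"
  · subst h5; decide
  · simp [pvExactLoopA, pvCanonicalA, pvScanB, pvTableB, h1, h2, h3, h4, h5]
    split_ifs <;> rfl

-- ===== VERDICT (by name: the statement is the Claim_ definition above) =====
theorem normalize_foreign_body_retrieval_tool_py_spec : Claim_equal_normalize_foreign_body_retrieval_tool_py := by
  intro value _
  unfold Spec_normalize_foreign_body_retrieval_tool_py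
  cases value with
  | none => rfl
  | some v =>
    unfold normalize_foreign_body_retrieval_tool_py normalize_foreign_body_retrieval_tool_py_alt
    simp only [pv_lower_empty_iff]
    by_cases he : PySem.Str.strip v == ""
    · simp [he]
    · simp only [he, if_neg, Bool.false_eq_true, not_false_iff]
      exact pv_core_eq (PySem.Str.lower (PySem.Str.strip v))
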